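-- pv_equiv track=rewrite | github.com/bardin-lab/tag-reads | tag_reads/tag_reads.py | parse_file_tags
-- ===== SOURCE A (Python) =====
-- def parse_file_tags(filetags):
--     """
--     :param filetags: string with filepath.
--                      optionally appended by the first letter that should be used for read and mate
--     :return: annotate_with, tag_prefix, tag_prefix_mate
--
--     >>> filetags = ['file_a:A:B', 'file_b:C:D', 'file_c']
--     >>> annotate_with, tag_prefix, tag_prefix_mate = parse_file_tags(filetags)
--     >>> annotate_with == ['file_a', 'file_b', 'file_c'] and tag_prefix == ['A', 'C', 'R'] and tag_prefix_mate == ['B', 'D', 'M']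
--     True
--     >>>
--     """
--     annotate_with = []
--     tag_prefix = []
--     tag_prefix_mate = []
--     for filetag in filetags:
--         if ':' in filetag:
--             filepath, tag, tag_mate = filetag.split(':')
--             annotate_with.append(filepath)
--             tag_prefix.append(tag.upper())
--             tag_prefix_mate.append(tag_mate.upper())
--         else:
--             annotate_with.append(filetag)
--             tag_prefix.append('R')  # Default is R for read, M for mate
--             tag_prefix_mate.append('M')
--     return annotate_with, tag_prefix, tag_prefix_mate
-- ===== SOURCE B (Python) =====
-- def parse_file_tags(filetags):
--     parsed = []
--     for filetag in filetags:
--         if ':' in filetag: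
--             filepath, tag, tag_mate = filetag.split(':')
--             parsed.append((filepath, tag.upper(), tag_mate.upper()))
--         else:
--             parsed.append((filetag, 'R', 'M'))
--     if not parsed:
--         return [], [], []
--     cols = [list(c) for c in zip(*parsed)]
--     return cols[0], cols[1], cols[2]
-- ===== Notes on version B (the rewrite author's own statement) =====
-- stated objective: alternative
-- what changed: B builds one list of (path, tag, mate) records in a single pass and then transposes the columns with zip(*parsed), instead of A's three interleaved append accumulators; Pre_ excludes filetags whose ':' count is not 0 or 2, on which both A and B raise ValueError.
import Mathlib
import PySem

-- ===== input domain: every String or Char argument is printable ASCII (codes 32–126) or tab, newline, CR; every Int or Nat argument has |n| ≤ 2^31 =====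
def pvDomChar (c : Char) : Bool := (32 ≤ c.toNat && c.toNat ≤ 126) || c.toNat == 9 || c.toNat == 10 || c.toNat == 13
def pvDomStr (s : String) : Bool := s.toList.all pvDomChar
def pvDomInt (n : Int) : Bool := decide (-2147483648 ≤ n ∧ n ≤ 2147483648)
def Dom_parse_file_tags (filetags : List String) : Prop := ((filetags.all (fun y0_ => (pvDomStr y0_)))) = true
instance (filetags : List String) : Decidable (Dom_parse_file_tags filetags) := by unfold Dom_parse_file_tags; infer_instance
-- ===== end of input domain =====

-- B builds a list of (path, tag, mate) records in one pass and then transposes the columns,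
-- instead of A's three interleaved append accumulators. Alternative decomposition, same cost.

-- ===== PORT A =====
-- A's loop over three append-accumulators; the strict 3-way unpack of split(':') raises
-- ValueError in Python unless the split has exactly 3 pieces (excluded by Pre_); there the
-- port leaves the accumulators unchanged, an unclaimed value.
def pvStepA (acc : List String × List String × List String) (filetag : String) :
    List String × List String × List String :=
  let (annotate_with, tag_prefix, tag_prefix_mate) := acc
  if PySem.Str.isIn ":" filetag then
    match PySem.Str.split? filetag ":" with
    | some [filepath, tag, tag_mate] =>
        (annotate_with ++ [filepath], tag_prefix ++ [PySem.Str.upper tag],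
         tag_prefix_mate ++ [PySem.Str.upper tag_mate])
    | _ => acc   -- ValueError in Python: outside Pre_
  else
    (annotate_with ++ [filetag], tag_prefix ++ ["R"], tag_prefix_mate ++ ["M"])

def parse_file_tags (filetags : List String) : List String × List String × List String :=
  filetags.foldl pvStepA ([], [], [])

-- ===== PORT B =====
-- one (path, tag, mate) record per filetag ('ValueError' case as in A's port: unclaimed)
def pvParseOne (filetag : String) : String × String × String :=
  if PySem.Str.isIn ":" filetag then
    match PySem.Str.split? filetag ":" with
    | some [filepath, tag, tag_mate] => (filepath, PySem.Str.upper tag, PySem.Str.upper tag_mate)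
    | _ => (filetag, filetag, filetag)   -- ValueError in Python: outside Pre_
  else (filetag, "R", "M")

def parse_file_tags_alt (filetags : List String) : List String × List String × List String :=
  let parsed := filetags.map pvParseOne
  if parsed = [] then ([], [], [])
  else (parsed.map (·.1), parsed.map (·.2.1), parsed.map (·.2.2))

-- ===== PRECONDITION & SPEC =====
-- Pre_ excludes exactly the inputs on which A (and B alike) raises ValueError: a filetag that
-- contains ':' but whose split(':') does not have exactly 3 pieces.
def Pre_parse_file_tags (filetags : List String) : Prop :=
  ∀ s ∈ filetags, PySem.Str.isIn ":" s = true →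
    ((PySem.Str.split? s ":").getD []).length = 3
instance (filetags : List String) : Decidable (Pre_parse_file_tags filetags) := by
  unfold Pre_parse_file_tags; infer_instance
def pvWitness_parse_file_tags : List String := ["file_a:A:B", "file_c"]

def Spec_parse_file_tags (filetags : List String) (out : List String × List String × List String) : Prop := out = parse_file_tags_alt filetags
instance (filetags : List String) (out : List String × List String × List String) : Decidable (Spec_parse_file_tags filetags out) := by unfold Spec_parse_file_tags; infer_instance

-- ===== CLAIM (what is proved, stated in full; the proofs are below) =====
def Claim_equal_parse_file_tags : Prop := ∀ (filetags : List String), Dom_parse_file_tags filetags → Pre_parse_file_tags filetags → Spec_parse_file_tags filetags (parse_file_tags filetags)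

-- ===== LEMMAS AND PROOFS =====

-- On an admitted element, A's loop body appends exactly the three projections of pvParseOne.
theorem parse_step_eq (x : String)
    (hx : PySem.Str.isIn ":" x = true → ((PySem.Str.split? x ":").getD []).length = 3)
    (a b c : List String) :
    pvStepA (a, b, c) x
    = (a ++ [(pvParseOne x).1], b ++ [(pvParseOne x).2.1], c ++ [(pvParseOne x).2.2]) := by
  unfold pvStepA pvParseOne
  by_cases hin : PySem.Str.isIn ":" x = true
  · have h3 := hx hin
    simp only [PySem.Str.isIn_eq, show (":".toList = [':']) from rfl] at hin
    match hm : PySem.Str.split? x ":" with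
    | some [p, t, m] => simp [hin]
    | none => simp [hm] at h3
    | some [] => simp [hm] at h3
    | some [p] => simp [hm] at h3
    | some [p, t] => simp [hm] at h3
    | some (p :: t :: m :: r :: rest) => simp [hm] at h3
  · simp only [PySem.Str.isIn_eq, show (":".toList = [':']) from rfl, Bool.not_eq_true] at hin
    simp [hin]

-- A's fold equals the accumulators extended by the three columns of the record list.
theorem parse_foldl_eq (l : List String)
    (hl : ∀ s ∈ l, PySem.Str.isIn ":" s = true → ((PySem.Str.split? s ":").getD []).length = 3)
    (a b c : List String) :
    l.foldl pvStepA (a, b, c)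
    = (a ++ (l.map pvParseOne).map (·.1), b ++ (l.map pvParseOne).map (·.2.1),
       c ++ (l.map pvParseOne).map (·.2.2)) := by
  induction l generalizing a b c with
  | nil => simp
  | cons x xs ih =>
    rw [List.foldl_cons]
    rw [parse_step_eq x (hl x List.mem_cons_self) a b c, ih (fun s hs => hl s (List.mem_cons_of_mem _ hs))]
    simp

-- ===== VERDICT (by name: the statement is the Claim_ definition above) =====
theorem parse_file_tags_spec : Claim_equal_parse_file_tags := by
  intro filetags _ hpre
  unfold Spec_parse_file_tags parse_file_tags parse_file_tags_alt
  rw [parse_foldl_eq filetags hpre [] [] []]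
  cases filetags with
  | nil => simp
  | cons x xs => simp
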